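-- pv_equiv track=rewrite | github.com/pvdlatesttrick/pvdmaproom | app/chat.py | _build_country_baseline_text
-- ===== SOURCE A (Python) =====
-- from typing import Any
--
-- def _build_country_baseline_text(country_baseline: list[dict[str, Any]], max_chars: int = 18000) -> str:
--     """Format baseline facts for every country so the bot can answer questions about any country."""
--     lines: list[str] = []
--     total = 0
--     for row in country_baseline:
--         name = (row.get("country_name") or "").strip()
--         if not name:
--             continue
--         parts = [name]
--         capital = (row.get("capital") or "").strip()
--         if capital:
--             parts.append(f"capital {capital}")
--         pop = (row.get("population") or "").strip()
--         if pop: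
--             parts.append(f"population {pop}")
--         gov = (row.get("government_type") or "").strip()
--         if gov:
--             parts.append(f"government {gov[:60]}")
--         gdp = (row.get("gdp_ppp") or "").strip()
--         if gdp:
--             parts.append(f"GDP (PPP) {gdp[:50]}")
--         line = ": " + ", ".join(parts[1:]) if len(parts) > 1 else ""
--         line = parts[0] + line + "\n"
--         if total + len(line) > max_chars:
--             break
--         lines.append(line)
--         total += len(line)
--     if not lines:
--         return ""
--     return "Country reference (every country below has embedded facts; use this when the user asks about a country, including when there are no recent articles for it):\n" + "".join(lines)
-- ===== SOURCE B (Python) =====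
-- _HEADER = ("Country reference (every country below has embedded facts; use this when the user asks "
--            "about a country, including when there are no recent articles for it):\n")
--
-- _SPECS = [
--     ("capital", "capital", None),
--     ("population", "population", None),
--     ("government_type", "government", 60),
--     ("gdp_ppp", "GDP (PPP)", 50),
-- ]
--
--
-- def _format_row(row):
--     name = (row.get("country_name") or "").strip()
--     if not name:
--         return ""
--     facts = [f"{label} {value[:cut]}"
--              for key, label, cut in _SPECS
--              for value in [(row.get(key) or "").strip()]
--              if value]
--     return name + (": " + ", ".join(facts) if facts else "") + "\n"
--
--
-- def _build_country_baseline_text(country_baseline, max_chars=18000):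
--     lines = [line for line in (_format_row(r) for r in country_baseline) if line]
--     # prefix sums of the line lengths, then binary search for the budget cut-off:
--     # the cut is the first index whose cumulative length exceeds max_chars
--     # (cums is nondecreasing, so this equals the maximal prefix that fits).
--     cums = []
--     running = 0
--     for line in lines:
--         running += len(line)
--         cums.append(running)
--     lo, hi = 0, len(lines)
--     while lo < hi:
--         mid = (lo + hi) // 2
--         if cums[mid] <= max_chars:
--             lo = mid + 1
--         else:
--             hi = mid
--     if lo == 0:
--         return ""
--     return _HEADER + "".join(lines[:lo])
-- ===== Notes on version B (the rewrite author's own statement) =====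
-- stated objective: alternative
-- what changed: B formats all rows first (a comprehension driven by a (key,label,truncation) spec table), then finds the character-budget cut-off by binary search over the prefix sums of the line lengths instead of A's fused loop with a running total and early break.
import Mathlib
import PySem

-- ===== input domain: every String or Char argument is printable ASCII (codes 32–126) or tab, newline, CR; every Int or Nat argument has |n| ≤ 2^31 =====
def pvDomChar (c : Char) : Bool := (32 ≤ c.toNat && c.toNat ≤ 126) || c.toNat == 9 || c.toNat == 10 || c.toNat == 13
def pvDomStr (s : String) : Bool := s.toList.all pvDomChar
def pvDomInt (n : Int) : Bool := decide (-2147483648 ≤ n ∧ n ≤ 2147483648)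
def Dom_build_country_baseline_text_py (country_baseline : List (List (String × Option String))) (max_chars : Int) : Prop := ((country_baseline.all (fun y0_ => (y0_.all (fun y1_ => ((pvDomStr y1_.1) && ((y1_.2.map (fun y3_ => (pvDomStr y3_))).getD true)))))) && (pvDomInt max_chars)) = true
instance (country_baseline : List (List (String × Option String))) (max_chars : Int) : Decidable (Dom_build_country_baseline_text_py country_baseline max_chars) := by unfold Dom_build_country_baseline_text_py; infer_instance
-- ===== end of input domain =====

-- B formats all rows from a field-spec table, then finds the character-budget cut-off by binary
-- search over the prefix sums of the line lengths instead of A's fused running-total loop (alternative).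

-- shared encoding of Python's `(row.get(k) or "")` under the dict→assoc-list convention (first match; None and "" both give "")
def pvGetOr (row : List (String × Option String)) (k : String) : String :=
  (((row.find? (fun p => p.1 == k)).map Prod.snd).join).getD ""

def pvHeader : String := "Country reference (every country below has embedded facts; use this when the user asks about a country, including when there are no recent articles for it):\n"

-- ===== PORT A =====
def pvALoop (rows : List (List (String × Option String))) (total : Int) (lines : List String) (max_chars : Int) : List String :=
  match rows with
  | [] => lines
  | row :: rest =>
    let name := PySem.Str.strip (pvGetOr row "country_name")
    if name = "" then pvALoop rest total lines max_chars
    else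
      let parts := [name]
      let capital := PySem.Str.strip (pvGetOr row "capital")
      let parts := if capital = "" then parts else parts ++ ["capital " ++ capital]
      let pop := PySem.Str.strip (pvGetOr row "population")
      let parts := if pop = "" then parts else parts ++ ["population " ++ pop]
      let gov := PySem.Str.strip (pvGetOr row "government_type")
      let parts := if gov = "" then parts else parts ++ ["government " ++ PySem.Str.slice gov none (some 60)]
      let gdp := PySem.Str.strip (pvGetOr row "gdp_ppp")
      let parts := if gdp = "" then parts else parts ++ ["GDP (PPP) " ++ PySem.Str.slice gdp none (some 50)]
      let line := if parts.length > 1 then ": " ++ PySem.Str.join ", " (parts.drop 1) else ""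
      let line := parts.headD "" ++ line ++ "\n"
      if total + PySem.Str.len line > max_chars then lines
      else pvALoop rest (total + PySem.Str.len line) (lines ++ [line]) max_chars

def build_country_baseline_text_py (country_baseline : List (List (String × Option String))) (max_chars : Int) : String :=
  let lines := pvALoop country_baseline 0 [] max_chars
  if lines = [] then "" else pvHeader ++ PySem.Str.join "" lines

-- ===== PORT B =====
def pvSpecs : List (String × String × Option Int) :=
  [("capital", "capital", none), ("population", "population", none),
   ("government_type", "government", some 60), ("gdp_ppp", "GDP (PPP)", some 50)]

-- _format_row: the nested comprehension `for key,label,cut in _SPECS for value in [...] if value` is a flatMap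
def pvFormatRow (row : List (String × Option String)) : String :=
  let name := PySem.Str.strip (pvGetOr row "country_name")
  if name = "" then ""
  else
    let facts := pvSpecs.flatMap (fun spec =>
      let value := PySem.Str.strip (pvGetOr row spec.1)
      if value ≠ "" then [spec.2.1 ++ " " ++ PySem.Str.slice value none spec.2.2] else [])
    name ++ (if facts ≠ [] then ": " ++ PySem.Str.join ", " facts else "") ++ "\n"

-- the prefix-sum list `cums` built by Source B's running-total append loop
def pvCums (lines : List String) (running : Int) : List Int :=
  match lines with
  | [] => []
  | l :: r => (running + PySem.Str.len l) :: pvCums r (running + PySem.Str.len l)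

-- Source B's binary-search `while lo < hi` loop; lo and hi stay in [0, len(cums)], so Nat is exact
def pvBS (cums : List Int) (mx : Int) (lo hi : Nat) : Nat :=
  if h : lo < hi then
    let mid := (lo + hi) / 2
    if cums.getD mid 0 ≤ mx then pvBS cums mx (mid + 1) hi
    else pvBS cums mx lo mid
  else lo
termination_by hi - lo
decreasing_by all_goals omega

def build_country_baseline_text_py_alt (country_baseline : List (List (String × Option String))) (max_chars : Int) : String :=
  let lines := (country_baseline.map pvFormatRow).filter (fun l => l ≠ "")
  let cums := pvCums lines 0
  let lo := pvBS cums max_chars 0 lines.length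
  if lo = 0 then "" else pvHeader ++ PySem.Str.join "" (lines.take lo)

-- ===== PRECONDITION & SPEC =====
def Spec_build_country_baseline_text_py (country_baseline : List (List (String × Option String))) (max_chars : Int) (out : String) : Prop := out = build_country_baseline_text_py_alt country_baseline max_chars
instance (country_baseline : List (List (String × Option String))) (max_chars : Int) (out : String) : Decidable (Spec_build_country_baseline_text_py country_baseline max_chars out) := by unfold Spec_build_country_baseline_text_py; infer_instance

-- ===== CLAIM (what is proved, stated in full; the proofs are below) =====
def Claim_equal_build_country_baseline_text_py : Prop := ∀ (country_baseline : List (List (String × Option String))) (max_chars : Int), Dom_build_country_baseline_text_py country_baseline max_chars → Spec_build_country_baseline_text_py country_baseline max_chars (build_country_baseline_text_py country_baseline max_chars)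

-- ===== LEMMAS AND PROOFS =====

-- A's fused loop, re-expressed as "take the budget prefix of the formatted lines" (proof-side only)
def pvBudget (cand : List String) (total : Int) (max_chars : Int) : List String :=
  match cand with
  | [] => []
  | l :: rest =>
    if total + PySem.Str.len l > max_chars then []
    else l :: pvBudget rest (total + PySem.Str.len l) max_chars

-- the fact list B's flatMap over pvSpecs computes, written out
def pvFacts (c p g d : String) : List String :=
  (if c ≠ "" then ["capital " ++ PySem.Str.slice c none none] else []) ++
  ((if p ≠ "" then ["population " ++ PySem.Str.slice p none none] else []) ++
  ((if g ≠ "" then ["government " ++ PySem.Str.slice g none (some 60)] else []) ++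
  ((if d ≠ "" then ["GDP (PPP) " ++ PySem.Str.slice d none (some 50)] else []) ++ [])))

theorem pvSlice_nn (s : String) : PySem.Str.slice s none none = s := by
  simp [PySem.Str.slice]

theorem pvFormatRow_eq (row : List (String × Option String)) :
    pvFormatRow row =
      (if PySem.Str.strip (pvGetOr row "country_name") = "" then ""
       else
        PySem.Str.strip (pvGetOr row "country_name") ++
          (if pvFacts (PySem.Str.strip (pvGetOr row "capital"))
              (PySem.Str.strip (pvGetOr row "population"))
              (PySem.Str.strip (pvGetOr row "government_type"))
              (PySem.Str.strip (pvGetOr row "gdp_ppp")) ≠ [] then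
            ": " ++ PySem.Str.join ", " (pvFacts (PySem.Str.strip (pvGetOr row "capital"))
              (PySem.Str.strip (pvGetOr row "population"))
              (PySem.Str.strip (pvGetOr row "government_type"))
              (PySem.Str.strip (pvGetOr row "gdp_ppp")))
           else "") ++ "\n") := by
  rfl

-- A's chain of conditional appends starting from [n] is n :: pvFacts
theorem pvParts_eq (n c p g d : String) :
    (if d = ""
      then (if g = ""
        then (if p = ""
          then (if c = "" then [n] else [n] ++ ["capital " ++ c])
          else (if c = "" then [n] else [n] ++ ["capital " ++ c]) ++ ["population " ++ p])
        else (if p = ""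
          then (if c = "" then [n] else [n] ++ ["capital " ++ c])
          else (if c = "" then [n] else [n] ++ ["capital " ++ c]) ++ ["population " ++ p]) ++
          ["government " ++ PySem.Str.slice g none (some 60)])
      else (if g = ""
        then (if p = ""
          then (if c = "" then [n] else [n] ++ ["capital " ++ c])
          else (if c = "" then [n] else [n] ++ ["capital " ++ c]) ++ ["population " ++ p])
        else (if p = ""
          then (if c = "" then [n] else [n] ++ ["capital " ++ c])
          else (if c = "" then [n] else [n] ++ ["capital " ++ c]) ++ ["population " ++ p]) ++
          ["government " ++ PySem.Str.slice g none (some 60)]) ++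
        ["GDP (PPP) " ++ PySem.Str.slice d none (some 50)]) = n :: pvFacts c p g d := by
  unfold pvFacts
  split_ifs <;> simp_all [pvSlice_nn]

-- the line A assembles from parts = n :: facts equals B's line for the same facts
theorem pvLine_eq (n : String) (facts : List String) :
    (n :: facts).headD "" ++ (if (n :: facts).length > 1 then ": " ++ PySem.Str.join ", " ((n :: facts).drop 1) else "") ++ "\n"
      = n ++ (if facts ≠ [] then ": " ++ PySem.Str.join ", " facts else "") ++ "\n" := by
  cases facts <;> simp

theorem pvFormatRow_ne_empty (row : List (String × Option String))
    (hname : PySem.Str.strip (pvGetOr row "country_name") ≠ "") : pvFormatRow row ≠ "" := by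
  rw [pvFormatRow_eq, if_neg hname]
  intro h
  have := congrArg String.toList h
  simp at this

theorem pvFormatRow_empty (row : List (String × Option String))
    (hname : PySem.Str.strip (pvGetOr row "country_name") = "") : pvFormatRow row = "" := by
  rw [pvFormatRow_eq, if_pos hname]

theorem pvALoop_eq (max_chars : Int) (rows : List (List (String × Option String))) :
    ∀ (total : Int) (lines : List String),
      pvALoop rows total lines max_chars
        = lines ++ pvBudget ((rows.map pvFormatRow).filter (fun l => l ≠ "")) total max_chars := by
  induction rows with
  | nil => intro t l; simp [pvALoop, pvBudget]
  | cons row rest ih =>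
    intro t l
    rw [pvALoop, List.map_cons, List.filter_cons]
    by_cases hname : PySem.Str.strip (pvGetOr row "country_name") = ""
    · rw [if_pos hname, pvFormatRow_empty row hname]
      simpa using ih t l
    · rw [if_neg hname,
        if_pos (decide_eq_true (pvFormatRow_ne_empty row hname))]
      simp only [pvParts_eq, pvLine_eq]
      rw [pvFormatRow_eq row, if_neg hname]
      rw [pvBudget]
      split_ifs <;> first | exact (List.append_nil l).symm | (rw [ih, List.append_assoc]; rfl)

-- pvBudget is "take while the prefix sum stays within budget"
theorem pvBudget_eq_take (mx : Int) (lines : List String) :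
    ∀ (t : Int), pvBudget lines t mx
      = lines.take ((pvCums lines t).takeWhile (fun c => decide (c ≤ mx))).length := by
  induction lines with
  | nil => intro t; simp [pvBudget, pvCums]
  | cons l r ih =>
    intro t
    rw [pvBudget, pvCums, List.takeWhile_cons]
    by_cases h : t + PySem.Str.len l ≤ mx
    · rw [if_neg (by omega), if_pos (by simpa using h)]
      simp [ih]
    · rw [if_pos (by omega), if_neg (by simpa using h)]
      simp

theorem pvCums_length (lines : List String) : ∀ t, (pvCums lines t).length = lines.length := by
  induction lines with
  | nil => intro t; rfl
  | cons l r ih => intro t; simp [pvCums, ih]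

theorem pvCums_ge (lines : List String) : ∀ t x, x ∈ pvCums lines t → t ≤ x := by
  induction lines with
  | nil => intro t x h; simp [pvCums] at h
  | cons l r ih =>
    intro t x h
    rw [pvCums] at h
    have hlen : (0:Int) ≤ PySem.Str.len l := by simp [PySem.Str.len_eq]
    rcases List.mem_cons.1 h with h | h
    · omega
    · have h1 := ih (t + PySem.Str.len l) x h
      omega

theorem pvCums_pairwise (lines : List String) : ∀ t, (pvCums lines t).Pairwise (· ≤ ·) := by
  induction lines with
  | nil => intro t; simp [pvCums]
  | cons l r ih =>
    intro t
    rw [pvCums]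
    exact List.pairwise_cons.2 ⟨fun x hx => pvCums_ge r (t + PySem.Str.len l) x hx, ih _⟩

-- takeWhile length is pinned by "the first m hold, the m-th fails"
theorem pvTakeWhile_len (mx : Int) (cums : List Int) :
    ∀ (m : Nat), m ≤ cums.length →
      (∀ i, i < m → cums.getD i 0 ≤ mx) →
      (∀ _ : m < cums.length, ¬ cums.getD m 0 ≤ mx) →
      (cums.takeWhile (fun c => decide (c ≤ mx))).length = m := by
  induction cums with
  | nil =>
    intro m hm _ _
    have : m = 0 := Nat.le_zero.mp hm
    subst this; simp
  | cons c r ih =>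
    intro m hm hlt hge
    cases m with
    | zero =>
      have := hge (by simp)
      simp only [List.getD_cons_zero] at this
      simp [this]
    | succ m' =>
      have hc : c ≤ mx := by have := hlt 0 (Nat.succ_pos _); simpa using this
      rw [List.takeWhile_cons, if_pos (by simpa using hc)]
      simp only [List.length_cons, Nat.add_left_inj]
      refine ih m' (by simpa using hm) (fun i hi => ?_) (fun h => ?_)
      · have := hlt (i + 1) (by omega); simpa using this
      · have := hge (by simpa using h); simpa using this

-- the binary search returns exactly the takeWhile prefix length (cums nondecreasing)
theorem pvBS_correct (cums : List Int) (mx : Int) (hpw : cums.Pairwise (· ≤ ·)) :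
    ∀ (n lo hi : Nat), hi - lo ≤ n → lo ≤ hi → hi ≤ cums.length →
      (∀ i, i < lo → cums.getD i 0 ≤ mx) →
      (∀ i, hi ≤ i → i < cums.length → ¬ cums.getD i 0 ≤ mx) →
      pvBS cums mx lo hi = (cums.takeWhile (fun c => decide (c ≤ mx))).length := by
  have hmono : ∀ i j, i ≤ j → j < cums.length → cums.getD i 0 ≤ cums.getD j 0 := by
    intro i j hij hj
    rcases Nat.eq_or_lt_of_le hij with rfl | hlt
    · exact le_refl _
    · have hi : i < cums.length := lt_trans hlt hj
      rw [List.getD_eq_getElem cums 0 hi, List.getD_eq_getElem cums 0 hj]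
      exact List.pairwise_iff_getElem.1 hpw i j hi hj hlt
  intro n
  induction n with
  | zero =>
    intro lo hi hn hle hhi hlo hge
    have : lo = hi := by omega
    subst this
    rw [pvBS, dif_neg (lt_irrefl lo)]
    exact (pvTakeWhile_len mx cums lo (le_trans hle hhi) hlo
      (fun h => hge lo (le_refl _) h)).symm
  | succ n ihn =>
    intro lo hi hn hle hhi hlo hge
    rw [pvBS]
    by_cases h : lo < hi
    · rw [dif_pos h]
      simp only
      by_cases hmid : cums.getD ((lo + hi) / 2) 0 ≤ mx
      · rw [if_pos hmid]
        refine ihn ((lo + hi) / 2 + 1) hi (by omega) (by omega) hhi (fun i hi' => ?_) hge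
        by_cases hilo : i < lo
        · exact hlo i hilo
        · exact le_trans (hmono i ((lo + hi) / 2) (by omega) (by omega)) hmid
      · rw [if_neg hmid]
        refine ihn lo ((lo + hi) / 2) (by omega) (by omega) (by omega) hlo (fun i hi1 hi2 => ?_)
        by_cases hihi : hi ≤ i
        · exact hge i hihi hi2
        · intro hc; exact hmid (le_trans (hmono ((lo + hi) / 2) i hi1 hi2) hc)
    · rw [dif_neg h]
      have : lo = hi := by omega
      subst this
      exact (pvTakeWhile_len mx cums lo (le_trans hle hhi) hlo
        (fun hh => hge lo (le_refl _) hh)).symm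

-- the budget prefix of L equals L.take (binary-search result)
theorem pvMain_eq (L : List String) (mc : Int) :
    (if pvBudget L 0 mc = [] then "" else pvHeader ++ PySem.Str.join "" (pvBudget L 0 mc))
      = (if pvBS (pvCums L 0) mc 0 L.length = 0 then ""
         else pvHeader ++ PySem.Str.join "" (L.take (pvBS (pvCums L 0) mc 0 L.length))) := by
  have hbs : pvBS (pvCums L 0) mc 0 L.length
      = ((pvCums L 0).takeWhile (fun c => decide (c ≤ mc))).length :=
    pvBS_correct (pvCums L 0) mc (pvCums_pairwise L 0) L.length 0 L.length
      (by omega) (Nat.zero_le _) (pvCums_length L 0).ge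
      (fun i hi => absurd hi (Nat.not_lt_zero i))
      (fun i h1 h2 => absurd (lt_of_lt_of_le h2 (pvCums_length L 0).le) (Nat.not_lt.2 h1))
  rw [pvBudget_eq_take, hbs]
  have hkle : ((pvCums L 0).takeWhile (fun c => decide (c ≤ mc))).length ≤ L.length :=
    le_trans (List.takeWhile_sublist _).length_le (pvCums_length L 0).le
  by_cases hk : ((pvCums L 0).takeWhile (fun c => decide (c ≤ mc))).length = 0
  · simp [hk]
  · rw [if_neg hk, if_neg ?_]
    intro h
    rcases (List.take_eq_nil_iff).1 h with h | h
    · exact hk h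
    · subst h; exact hk (Nat.le_zero.mp hkle)

-- ===== VERDICT (by name: the statement is the Claim_ definition above) =====
theorem build_country_baseline_text_py_spec : Claim_equal_build_country_baseline_text_py := by
  intro cb mc _
  unfold Spec_build_country_baseline_text_py build_country_baseline_text_py build_country_baseline_text_py_alt
  rw [pvALoop_eq]
  simp only [List.nil_append]
  exact pvMain_eq ((cb.map pvFormatRow).filter (fun l => l ≠ "")) mc
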